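-- pv_equiv track=rewrite | github.com/DataArtifex/rdf-toolkit | rdflib/__init__.py | _split_literal
-- ===== SOURCE A (Python) =====
-- from typing import Any, Dict, Iterable, Iterator, List, Optional, Tuple
--
-- def _split_literal(token: str) -> Tuple[str, str]:
--     end = 1
--     escaped = False
--     while end < len(token):
--         char = token[end]
--         if char == "\\" and not escaped:
--             escaped = True
--             end += 1
--             continue
--         if char == '"' and not escaped:
--             break
--         escaped = False
--         end += 1
--     value = token[1:end]
--     rest = token[end + 1 :].strip()
--     return value, rest
-- ===== SOURCE B (Python) =====
-- def _split_literal(token):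
--     n = len(token)
--     end = n
--     i = 1
--     while True:
--         j = token.find('"', i)
--         if j == -1:
--             break
--         k = j
--         while k > 1 and token[k - 1] == "\\":
--             k -= 1
--         if (j - k) % 2 == 0:
--             end = j
--             break
--         i = j + 1
--     value = token[1:end]
--     rest = token[end + 1:].strip()
--     return value, rest
-- ===== Notes on version B (the rewrite author's own statement) =====
-- stated objective: faster
-- what changed: Replaces the char-by-char scan with an escaped flag by repeated str.find jumps to the next quote candidate, accepting a quote iff the run of backslashes immediately before it (counted back, never below index 1) has even length.
import Mathlib
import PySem

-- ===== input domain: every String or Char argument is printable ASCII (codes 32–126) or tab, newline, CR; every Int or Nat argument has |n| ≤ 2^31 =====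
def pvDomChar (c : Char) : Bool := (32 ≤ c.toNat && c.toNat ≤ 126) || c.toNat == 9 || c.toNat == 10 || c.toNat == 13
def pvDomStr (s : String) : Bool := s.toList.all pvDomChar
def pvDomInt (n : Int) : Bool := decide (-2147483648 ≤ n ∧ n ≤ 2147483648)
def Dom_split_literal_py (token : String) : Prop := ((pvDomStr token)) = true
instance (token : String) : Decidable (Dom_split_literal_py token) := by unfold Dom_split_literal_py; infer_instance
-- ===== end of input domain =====

-- B replaces A's char-by-char scan with an escaped flag by find-jumps to each quote
-- candidate, accepted iff the backslash run right before it has even length (measured faster: find runs in C).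

-- ===== PORT A =====
-- A's while loop: scans token[end] from end = 1 carrying the escaped flag; returns how many
-- characters it consumes before the unescaped closing quote (or the end of the string).
def aLoopA : List Char → Bool → Nat
  | [], _ => 0
  | c :: rest, escaped =>
    if c == '\\' && !escaped then 1 + aLoopA rest true
    else if c == '"' && !escaped then 0
    else 1 + aLoopA rest false

def split_literal_py (token : String) : String × String :=
  let cs := token.toList
  let e : Nat := 1 + aLoopA (cs.drop 1) false
  let value := PySem.List.slice cs (some 1) (some (e : Int))
  let rest := PySem.Chars.strip (PySem.List.slice cs (some ((e : Int) + 1)) none)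
  (String.ofList value, String.ofList rest)

-- ===== PORT B =====
-- B's inner while loop: 'while k > 1 and token[k-1] == "\\": k -= 1'
def backK (cs : List Char) : Nat → Nat
  | 0 => 0
  | 1 => 1
  | k + 2 => if cs[k + 1]? == some '\\' then backK cs (k + 1) else k + 2

-- B's outer loop: jump with find to the next '"' at index ≥ i; accept it iff the backslash
-- run before it is even, else continue from just after it.  fuel only makes it total.
def bLoop (cs : List Char) : Nat → Int → Nat
  | 0, _ => cs.length
  | fuel + 1, i =>
    let j := PySem.Chars.findFrom cs ['"'] i none
    if j == -1 then cs.length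
    else
      let k := backK cs j.toNat
      if (j.toNat - k) % 2 == 0 then j.toNat
      else bLoop cs fuel (j + 1)

def split_literal_py_alt (token : String) : String × String :=
  let cs := token.toList
  let e : Nat := bLoop cs (cs.length + 1) 1
  let value := PySem.List.slice cs (some 1) (some (e : Int))
  let rest := PySem.Chars.strip (PySem.List.slice cs (some ((e : Int) + 1)) none)
  (String.ofList value, String.ofList rest)

-- ===== PRECONDITION & SPEC =====
def Spec_split_literal_py (token : String) (out : String × String) : Prop := out = split_literal_py_alt token
instance (token : String) (out : String × String) : Decidable (Spec_split_literal_py token out) := by unfold Spec_split_literal_py; infer_instance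

-- ===== CLAIM (what is proved, stated in full; the proofs are below) =====
def Claim_equal_split_literal_py : Prop := ∀ (token : String), Dom_split_literal_py token → Spec_split_literal_py token (split_literal_py token)

-- ===== LEMMAS AND PROOFS =====

-- a position e is an acceptable closing quote: a '"' preceded by an even backslash run
def okB (cs : List Char) (e : Nat) : Bool :=
  (cs[e]? == some '"') && ((e - backK cs e) % 2 == 0)

-- the first acceptable position ≥ p, or cs.length
def firstOk (cs : List Char) (p : Nat) : Nat :=
  if h : p < cs.length then (if okB cs p then p else firstOk cs (p + 1)) else cs.length
termination_by cs.length - p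

lemma backK_le (cs : List Char) (p : Nat) : backK cs p ≤ p := by
  induction p using backK.induct cs with
  | case1 => simp [backK]
  | case2 => simp [backK]
  | case3 k h ih => simp only [backK, h, if_pos]; omega
  | case4 k h => simp [backK, h]

lemma backK_succ_bs (cs : List Char) (p : Nat) (h1 : 1 ≤ p) (h : cs[p]? = some '\\') :
    backK cs (p + 1) = backK cs p := by
  obtain ⟨q, rfl⟩ : ∃ q, p = q + 1 := ⟨p - 1, by omega⟩
  simp [backK, h]

lemma backK_succ_not (cs : List Char) (p : Nat) (h : ¬ cs[p]? = some '\\') :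
    backK cs (p + 1) = p + 1 := by
  cases p with
  | zero => simp [backK]
  | succ q => simp [backK, h]

lemma firstOk_hit (cs : List Char) (p : Nat) (hp : p < cs.length) (h : okB cs p = true) :
    firstOk cs p = p := by
  rw [firstOk]; simp [hp, h]

lemma firstOk_skip1 (cs : List Char) (p : Nat) (hp : p < cs.length) (h : okB cs p = false) :
    firstOk cs p = firstOk cs (p + 1) := by
  rw [firstOk]; simp [hp, h]

lemma firstOk_len (cs : List Char) (p : Nat) (hp : cs.length ≤ p) : firstOk cs p = cs.length := by
  rw [firstOk]; simp [Nat.not_lt.mpr hp]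

lemma firstOk_skip (cs : List Char) (p q : Nat) (hpq : p ≤ q)
    (h : ∀ e, p ≤ e → e < q → okB cs e = false) : firstOk cs p = firstOk cs q := by
  obtain ⟨d, rfl⟩ : ∃ d, q = p + d := ⟨q - p, by omega⟩
  clear hpq
  induction d generalizing p with
  | zero => rfl
  | succ d ih =>
    by_cases hp : p < cs.length
    · rw [firstOk_skip1 cs p hp (h p le_rfl (by omega))]
      have := ih (p + 1) (fun e he1 he2 => h e (by omega) (by omega))
      rw [this]; ring_nf
    · rw [firstOk_len cs p (by omega), firstOk_len cs (p + (d + 1)) (by omega)]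

lemma singleton_prefix_iff {α : Type} (a : α) (l : List α) : [a] <+: l ↔ l[0]? = some a := by
  cases l with
  | nil => simp
  | cons b t => simp [List.cons_prefix_cons, eq_comm]

-- A's scan from position p (flag = parity of the backslash run ending before p) finds firstOk
lemma aLoop_eq (cs : List Char) (p : Nat) (h1 : 1 ≤ p) (h2 : p ≤ cs.length) :
    p + aLoopA (cs.drop p) (decide ((p - backK cs p) % 2 = 1)) = firstOk cs p := by
  obtain ⟨d, hd⟩ : ∃ d, cs.length - p = d := ⟨_, rfl⟩
  induction d generalizing p with
  | zero =>
    have hp : p = cs.length := by omega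
    subst hp
    simp [List.drop_length, aLoopA, firstOk_len cs cs.length le_rfl]
  | succ d ih =>
    have hp : p < cs.length := by omega
    have hdrop : cs.drop p = cs[p] :: cs.drop (p + 1) := List.drop_eq_getElem_cons hp
    have hget : cs[p]? = some cs[p] := List.getElem?_eq_getElem hp
    have hbk := backK_le cs p
    rw [hdrop]
    by_cases hbs : cs[p] = '\\'
    · -- a backslash: the flag flips, position advances
      have hbk1 : backK cs (p + 1) = backK cs p :=
        backK_succ_bs cs p h1 (by rw [hget, hbs])
      have hok : okB cs p = false := by
        simp [okB, hget, hbs]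
      by_cases hesc : (p - backK cs p) % 2 = 1
      · -- escaped: else-branch, flag becomes false (even run at p+1)
        have : decide ((p - backK cs p) % 2 = 1) = true := by simp [hesc]
        rw [this]
        simp only [aLoopA, hbs]
        norm_num
        have hflag : (((p + 1) - backK cs (p + 1)) % 2 = 1) = False := by
          rw [hbk1]; simp; omega
        have := ih (p + 1) (by omega) hp (by omega)
        rw [show (decide (((p + 1) - backK cs (p + 1)) % 2 = 1)) = false by simp [hbk1]; omega] at this
        rw [firstOk_skip1 cs p hp hok, ← this]; omega
      · -- not escaped: first branch, flag becomes true (odd run at p+1)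
        have : decide ((p - backK cs p) % 2 = 1) = false := by simp [hesc]
        rw [this]
        simp only [aLoopA, hbs]
        norm_num
        have := ih (p + 1) (by omega) hp (by omega)
        rw [show (decide (((p + 1) - backK cs (p + 1)) % 2 = 1)) = true by simp [hbk1]; omega] at this
        rw [firstOk_skip1 cs p hp hok, ← this]; omega
    · have hbk1 : backK cs (p + 1) = p + 1 :=
        backK_succ_not cs p (by rw [hget]; intro hc; exact hbs (by injection hc))
      by_cases hq : cs[p] = '"'
      · by_cases hesc : (p - backK cs p) % 2 = 1
        · -- escaped quote: else-branch
          have : decide ((p - backK cs p) % 2 = 1) = true := by simp [hesc]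
          rw [this]
          simp only [aLoopA, hq]
          norm_num
          have hok : okB cs p = false := by
            simp [okB, hget, hq]; omega
          have := ih (p + 1) (by omega) hp (by omega)
          rw [show (decide (((p + 1) - backK cs (p + 1)) % 2 = 1)) = false by simp [hbk1]] at this
          rw [firstOk_skip1 cs p hp hok, ← this]; omega
        · -- unescaped quote: break
          have : decide ((p - backK cs p) % 2 = 1) = false := by simp [hesc]
          rw [this]
          simp only [aLoopA, hq]
          norm_num
          exact (firstOk_hit cs p hp (by simp [okB, hget, hq]; omega)).symm
      · -- ordinary character: else-branch, flag false
        have hok : okB cs p = false := by simp [okB, hget, hq]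
        have hstep : aLoopA (cs[p] :: cs.drop (p + 1)) (decide ((p - backK cs p) % 2 = 1)) =
            1 + aLoopA (cs.drop (p + 1)) false := by
          simp [aLoopA, hbs, hq]
        rw [hstep]
        have := ih (p + 1) (by omega) hp (by omega)
        rw [show (decide (((p + 1) - backK cs (p + 1)) % 2 = 1)) = false by simp [hbk1]] at this
        rw [firstOk_skip1 cs p hp hok, ← this]; omega

-- B's find-jump loop also computes firstOk
lemma bLoop_eq (cs : List Char) (fuel p : Nat) (h1 : 1 ≤ p) (h2 : p ≤ cs.length)
    (hf : cs.length - p < fuel) : bLoop cs fuel (p : Int) = firstOk cs p := by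
  induction fuel generalizing p with
  | zero => omega
  | succ f ih =>
    rw [bLoop]
    rw [PySem.Chars.findFrom_natCast cs ['"'] p h2]
    by_cases hfind : PySem.Chars.find (cs.drop p) ['"'] = -1
    · -- no quote at or after p
      rw [if_pos hfind]
      simp only [beq_self_eq_true, if_pos]
      have hnone : ∀ e, p ≤ e → e < cs.length → okB cs e = false := by
        intro e he1 he2
        have hnin : ¬ ['"'] <:+: cs.drop p := (PySem.Chars.find_eq_neg_one_iff _ _).mp hfind
        by_contra hok
        rw [Bool.not_eq_false] at hok
        simp only [okB, Bool.and_eq_true, beq_iff_eq] at hok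
        apply hnin
        apply (List.singleton_infix_iff _ _).mpr
        apply List.mem_of_getElem? (i := e - p)
        rw [List.getElem?_drop, show p + (e - p) = e by omega]
        exact hok.1
      rw [firstOk_skip cs p cs.length h2 hnone, firstOk_len cs cs.length le_rfl]
    · -- a quote at j = p + find
      rw [if_neg hfind]
      have hge : 0 ≤ PySem.Chars.find (cs.drop p) ['"'] := by
        have := PySem.Chars.neg_one_le_find (cs.drop p) ['"']
        omega
      obtain ⟨fnat, hfnat⟩ : ∃ n : Nat, PySem.Chars.find (cs.drop p) ['"'] = (n : Int) :=
        ⟨_, (Int.toNat_of_nonneg hge).symm⟩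
      have hj : ((p : Int) + (fnat : Int)) ≠ -1 := by omega
      rw [hfnat, if_neg (by simpa using hj)]
      have hspec := PySem.Chars.find_spec (s := cs.drop p) (sub := ['"']) (by omega)
      set j : Nat := p + fnat with hjdef
      have htn : ((p : Int) + (fnat : Int)).toNat = j := by omega
      have hqj : cs[j]? = some '"' := by
        have hpre : ['"'] <+: (cs.drop p).drop fnat := by
          have := hspec.1
          simp only [hfnat, Int.toNat_natCast] at this
          exact this
        rw [List.drop_drop] at hpre
        have h0 := (singleton_prefix_iff '"' _).mp hpre
        rw [List.getElem?_drop] at h0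
        rw [hjdef, show p + fnat = p + fnat + 0 by omega]
        exact h0
      have hjlt : j < cs.length := by
        by_contra hge2
        rw [List.getElem?_eq_none (by omega)] at hqj
        simp at hqj
      have hmin : ∀ e, p ≤ e → e < j → okB cs e = false := by
        intro e he1 he2
        have hnpre := hspec.2 (e - p) (by omega)
        rw [List.drop_drop] at hnpre
        by_contra hok
        rw [Bool.not_eq_false] at hok
        simp only [okB, Bool.and_eq_true, beq_iff_eq] at hok
        apply hnpre
        apply (singleton_prefix_iff '"' (cs.drop (p + (e - p)))).mpr
        rw [List.getElem?_drop]
        rw [show p + (e - p) + 0 = e by omega]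
        exact hok.1
      rw [htn]
      by_cases hev : (j - backK cs j) % 2 = 0
      · rw [if_pos (by simpa using hev)]
        rw [firstOk_skip cs p j (by omega) hmin,
            firstOk_hit cs j hjlt (by simp [okB, hqj]; omega)]
      · rw [if_neg (by simpa using hev)]
        have hcast : (p : Int) + (fnat : Int) + 1 = ((j + 1 : Nat) : Int) := by
          push_cast; omega
        rw [hcast, ih (j + 1) (by omega) (by omega) (by omega)]
        rw [firstOk_skip cs p j (by omega) hmin,
            firstOk_skip1 cs j hjlt (by simp [okB, hqj]; omega)]

-- ===== VERDICT (by name: the statement is the Claim_ definition above) =====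
theorem split_literal_py_spec : Claim_equal_split_literal_py := by
  intro token _
  unfold Spec_split_literal_py
  by_cases hnil : token.toList = []
  · simp only [split_literal_py, split_literal_py_alt, hnil]
    decide
  · have hlen : 1 ≤ token.toList.length := by
      cases h : token.toList with
      | nil => exact absurd h hnil
      | cons c rest => simp
    have hA := aLoop_eq token.toList 1 le_rfl hlen
    rw [show (decide ((1 - backK token.toList 1) % 2 = 1)) = false by simp [backK]] at hA
    have hB := bLoop_eq token.toList (token.toList.length + 1) 1 le_rfl hlen (by omega)
    rw [Nat.cast_one] at hB
    simp only [split_literal_py, split_literal_py_alt, hA, hB]
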